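-- pv_equiv track=rewrite | github.com/kadirhanpolat/pytop | src/pytop/separation.py | _finite_basic_separation
-- ===== SOURCE A (Python) =====
-- from typing import Any
--
-- def _finite_basic_separation(opens: list[set[Any]], points: list[Any], property_name: str) -> bool:
--     for i, x in enumerate(points):
--         for y in points[i + 1 :]:
--             if property_name == "t0":
--                 if not any((x in U) ^ (y in U) for U in opens):
--                     return False
--             elif property_name == "t1":
--                 has_x_not_y = any(x in U and y not in U for U in opens)
--                 has_y_not_x = any(y in U and x not in U for U in opens)
--                 if not (has_x_not_y and has_y_not_x):
--                     return False
--             elif property_name == "hausdorff":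
--                 found = False
--                 for U in opens:
--                     if x not in U:
--                         continue
--                     for V in opens:
--                         if y in V and U.isdisjoint(V):
--                             found = True
--                             break
--                     if found:
--                         break
--                 if not found:
--                     return False
--     return True
-- ===== SOURCE B (Python) =====
-- def _finite_basic_separation(opens, points, property_name):
--     sigs = [tuple(j for j, U in enumerate(opens) if x in U) for x in points]
--     if property_name == "t0":
--         seen = set()
--         for s in sigs:
--             if s in seen:
--                 return False
--             seen.add(s)
--         return True
--     if property_name == "t1":
--         for i, s in enumerate(sigs):
--             for t in sigs[i + 1:]:
--                 if all(j in t for j in s) or all(j in s for j in t):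
--                     return False
--         return True
--     if property_name == "hausdorff":
--         n = len(opens)
--         disj = [[opens[u].isdisjoint(opens[v]) for v in range(n)] for u in range(n)]
--         for s_i, s in enumerate(sigs):
--             for t in sigs[s_i + 1:]:
--                 if not any(disj[u][v] for u in s for v in t):
--                     return False
--         return True
--     return True
-- ===== Notes on version B (the rewrite author's own statement) =====
-- stated objective: faster
-- what changed: B precomputes one open-membership signature per point (indices of opens containing it) and, for hausdorff, an opens-by-opens disjointness matrix; t0 becomes a single seen-set pass over signatures instead of a pairwise scan, and t1/hausdorff pair checks become signature subset/matrix lookups instead of rescanning all opens (and their elements) per pair.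
import Mathlib
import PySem

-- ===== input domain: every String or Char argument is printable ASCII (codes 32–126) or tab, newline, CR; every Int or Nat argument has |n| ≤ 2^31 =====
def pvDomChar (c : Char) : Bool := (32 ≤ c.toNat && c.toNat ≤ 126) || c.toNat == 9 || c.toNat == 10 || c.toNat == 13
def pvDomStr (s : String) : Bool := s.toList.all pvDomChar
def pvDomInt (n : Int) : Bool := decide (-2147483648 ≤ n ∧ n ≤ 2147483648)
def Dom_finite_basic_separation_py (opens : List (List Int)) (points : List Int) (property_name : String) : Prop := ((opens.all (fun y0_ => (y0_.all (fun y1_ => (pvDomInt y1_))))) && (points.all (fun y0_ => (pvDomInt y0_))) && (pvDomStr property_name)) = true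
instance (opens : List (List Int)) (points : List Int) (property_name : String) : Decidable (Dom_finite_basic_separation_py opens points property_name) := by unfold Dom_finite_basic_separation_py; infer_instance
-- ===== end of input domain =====

-- B precomputes per-point open-membership signatures (and, for "hausdorff", an opens×opens
-- disjointness matrix) so pair checks work on signatures; "t0" becomes a single seen-set pass.
-- The equivalence proved is about the RETURN value (neither program mutates its arguments).

-- ===== PORT A =====
-- inner `for U in opens: … for V in opens: …` loop of the "hausdorff" branch (continue/break kept)
def hausLoopA (opens : List (List Int)) (x y : Int) : List (List Int) → Bool
  | [] => false
  | U :: rest =>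
    if U.contains x then
      if opens.any (fun V => V.contains y && PySem.Set.isdisjoint U V) then true
      else hausLoopA opens x y rest
    else hausLoopA opens x y rest

-- body of the pair loop: `true` = no `return False` taken for the pair (x, y)
def pairA (opens : List (List Int)) (pn : String) (x y : Int) : Bool :=
  if pn == "t0" then opens.any (fun U => U.contains x != U.contains y)
  else if pn == "t1" then
    (opens.any (fun U => U.contains x && !(U.contains y))) &&
    (opens.any (fun U => U.contains y && !(U.contains x)))
  else if pn == "hausdorff" then hausLoopA opens x y opens
  else true

-- `for i, x in enumerate(points): for y in points[i+1:]: …` with the early `return False`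
def goA (opens : List (List Int)) (pn : String) : List Int → Bool
  | [] => true
  | x :: rest => if rest.all (fun y => pairA opens pn x y) then goA opens pn rest else false

def finite_basic_separation_py (opens : List (List Int)) (points : List Int) (property_name : String) : Bool :=
  goA opens property_name points

-- ===== PORT B =====
-- tuple(j for j, U in enumerate(opens) if x in U)
def sigB (opens : List (List Int)) (x : Int) : List Int :=
  ((PySem.List.enumerate opens).filter (fun p => p.2.contains x)).map (fun p => p.1)

-- `all(j in t for j in s)`
def subB (s t : List Int) : Bool := s.all (fun j => t.contains j)

-- "t0": single pass over sigs with a seen set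
def t0Loop : List (List Int) → PySem.Set (List Int) → Bool
  | [], _ => true
  | s :: rest, seen =>
    if PySem.Set.contains seen s then false else t0Loop rest (PySem.Set.add seen s)

-- "t1": pair loop over the signature list
def t1Go : List (List Int) → Bool
  | [] => true
  | s :: rest => if rest.all (fun t => !(subB s t || subB t s)) then t1Go rest else false

-- [[opens[u].isdisjoint(opens[v]) for v in range(n)] for u in range(n)]
def disjM (opens : List (List Int)) : List (List Bool) :=
  (PySem.List.pyRange 0 (opens.length : Int) 1).map (fun u =>
    (PySem.List.pyRange 0 (opens.length : Int) 1).map (fun v =>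
      PySem.Set.isdisjoint (PySem.List.pyGetD opens u []) (PySem.List.pyGetD opens v [])))

-- `any(disj[u][v] for u in s for v in t)`
def hPairB (disj : List (List Bool)) (s t : List Int) : Bool :=
  s.any (fun u => t.any (fun v => PySem.List.pyGetD (PySem.List.pyGetD disj u []) v false))

-- "hausdorff": pair loop over the signature list using the matrix
def hGo (disj : List (List Bool)) : List (List Int) → Bool
  | [] => true
  | s :: rest => if rest.all (fun t => hPairB disj s t) then hGo disj rest else false

def finite_basic_separation_py_alt (opens : List (List Int)) (points : List Int) (property_name : String) : Bool :=
  let sigs := points.map (sigB opens)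
  if property_name == "t0" then t0Loop sigs PySem.Set.empty
  else if property_name == "t1" then t1Go sigs
  else if property_name == "hausdorff" then hGo (disjM opens) sigs
  else true

-- ===== PRECONDITION & SPEC =====
def Spec_finite_basic_separation_py (opens : List (List Int)) (points : List Int) (property_name : String) (out : Bool) : Prop := out = finite_basic_separation_py_alt opens points property_name
instance (opens : List (List Int)) (points : List Int) (property_name : String) (out : Bool) : Decidable (Spec_finite_basic_separation_py opens points property_name out) := by unfold Spec_finite_basic_separation_py; infer_instance

-- ===== CLAIM (what is proved, stated in full; the proofs are below) =====
def Claim_equal_finite_basic_separation_py : Prop := ∀ (opens : List (List Int)) (points : List Int) (property_name : String), Dom_finite_basic_separation_py opens points property_name → Spec_finite_basic_separation_py opens points property_name (finite_basic_separation_py opens points property_name)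

-- ===== LEMMAS AND PROOFS =====

-- signature with a general enumeration start, for induction
def sigFrom (k : Int) (opens : List (List Int)) (x : Int) : List Int :=
  ((PySem.List.enumerate opens k).filter (fun p => p.2.contains x)).map (fun p => p.1)

theorem sigFrom_nil (k x : Int) : sigFrom k [] x = [] := by
  simp [sigFrom, PySem.List.enumerate_nil]

theorem sigFrom_cons (k : Int) (U : List Int) (opens : List (List Int)) (x : Int) :
    sigFrom k (U :: opens) x =
      if x ∈ U then k :: sigFrom (k + 1) opens x else sigFrom (k + 1) opens x := by
  simp only [sigFrom, PySem.List.enumerate_cons, List.filter_cons]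
  by_cases h : x ∈ U <;> simp [h]

theorem sigB_eq_sigFrom (opens : List (List Int)) (x : Int) : sigB opens x = sigFrom 0 opens x := rfl

theorem mem_sigFrom_ge (k : Int) (opens : List (List Int)) (x j : Int)
    (hj : j ∈ sigFrom k opens x) : k ≤ j := by
  induction opens generalizing k with
  | nil => simp [sigFrom_nil] at hj
  | cons U rest ih =>
    rw [sigFrom_cons] at hj
    by_cases h : x ∈ U
    · rw [if_pos h] at hj
      rcases List.mem_cons.mp hj with rfl | h1
      · omega
      · have := ih (k + 1) h1; omega
    · rw [if_neg h] at hj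
      have := ih (k + 1) hj; omega

theorem sigFrom_eq_iff (k : Int) (opens : List (List Int)) (x y : Int) :
    (sigFrom k opens x = sigFrom k opens y) ↔ ∀ U ∈ opens, (x ∈ U ↔ y ∈ U) := by
  induction opens generalizing k with
  | nil => simp [sigFrom_nil]
  | cons U rest ih =>
    rw [sigFrom_cons, sigFrom_cons]
    by_cases hx : x ∈ U <;> by_cases hy : y ∈ U <;> simp [hx, hy]
    · exact ih (k + 1)
    · intro h
      have hm : (k : Int) ∈ sigFrom (k + 1) rest y := by rw [← h]; simp
      have := mem_sigFrom_ge _ _ _ _ hm; omega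
    · intro h
      have hm : (k : Int) ∈ sigFrom (k + 1) rest x := by rw [h]; simp
      have := mem_sigFrom_ge _ _ _ _ hm; omega
    · exact ih (k + 1)

theorem subB_iff (s t : List Int) : subB s t = true ↔ ∀ j ∈ s, j ∈ t := by
  simp [subB, List.all_eq_true]

theorem mem_sigFrom_iff (k : Int) (opens : List (List Int)) (x j : Int) :
    j ∈ sigFrom k opens x ↔
      ∃ i : Nat, ∃ h : i < opens.length, j = k + i ∧ x ∈ opens[i] := by
  induction opens generalizing k with
  | nil => simp [sigFrom_nil]
  | cons U rest ih =>
    rw [sigFrom_cons]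
    by_cases hU : x ∈ U
    · rw [if_pos hU]
      simp only [List.mem_cons, ih (k + 1)]
      constructor
      · rintro (rfl | ⟨i, hi, rfl, hc⟩)
        · exact ⟨0, by simp, by simp, by simpa using hU⟩
        · exact ⟨i + 1, by simpa using hi, by push_cast; ring, by simpa using hc⟩
      · rintro ⟨i, hi, rfl, hc⟩
        cases i with
        | zero => left; simp
        | succ n =>
          right
          exact ⟨n, by simpa using hi, by push_cast; ring, by simpa using hc⟩
    · rw [if_neg hU, ih (k + 1)]
      constructor
      · rintro ⟨i, hi, rfl, hc⟩
        exact ⟨i + 1, by simpa using hi, by push_cast; ring, by simpa using hc⟩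
      · rintro ⟨i, hi, rfl, hc⟩
        cases i with
        | zero => simp at hc; exact absurd hc hU
        | succ n =>
          exact ⟨n, by simpa using hi, by push_cast; ring, by simpa using hc⟩

theorem subB_sigFrom_iff (opens : List (List Int)) (x y : Int) :
    subB (sigFrom 0 opens x) (sigFrom 0 opens y) = true ↔
      ∀ U ∈ opens, x ∈ U → y ∈ U := by
  rw [subB_iff]
  constructor
  · intro h U hU hxU
    obtain ⟨i, hi, rfl⟩ := List.mem_iff_getElem.mp hU
    have hm : (i : Int) ∈ sigFrom 0 opens x := by
      rw [mem_sigFrom_iff]; exact ⟨i, hi, by simp, hxU⟩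
    obtain ⟨i', hi', he, hyi'⟩ := (mem_sigFrom_iff 0 opens y (i : Int)).mp (h _ hm)
    have : i = i' := by omega
    subst this; exact hyi'
  · intro h j hj
    obtain ⟨i, hi, rfl, hxi⟩ := (mem_sigFrom_iff 0 opens x j).mp hj
    rw [mem_sigFrom_iff]
    exact ⟨i, hi, rfl, h _ (List.getElem_mem hi) hxi⟩

theorem hausLoopA_eq_any (opens : List (List Int)) (x y : Int) (l : List (List Int)) :
    hausLoopA opens x y l
      = l.any (fun U => U.contains x && opens.any (fun V => V.contains y && PySem.Set.isdisjoint U V)) := by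
  induction l with
  | nil => rfl
  | cons U rest ih =>
    rw [hausLoopA, List.any_cons, ← ih]
    cases hU : U.contains x with
    | false => rw [if_neg (by simp), Bool.false_and, Bool.false_or]
    | true =>
      rw [if_pos rfl, Bool.true_and]
      cases hA : opens.any (fun V => V.contains y && PySem.Set.isdisjoint U V) with
      | false => rw [if_neg (by simp), Bool.false_or]
      | true => rw [if_pos rfl, Bool.true_or]

theorem disjM_get (opens : List (List Int)) (i j : Nat) (hi : i < opens.length) (hj : j < opens.length) :
    PySem.List.pyGetD (PySem.List.pyGetD (disjM opens) (i : Int) []) (j : Int) false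
      = PySem.Set.isdisjoint opens[i] opens[j] := by
  rw [disjM]
  rw [PySem.List.pyGetD_map_pyRange_of_nonneg _ _ _ _ (by positivity) (by exact_mod_cast hi)]
  rw [PySem.List.pyGetD_map_pyRange_of_nonneg _ _ _ _ (by positivity) (by exact_mod_cast hj)]
  rw [PySem.List.pyGetD_natCast, PySem.List.pyGetD_natCast]
  rw [List.getD_eq_getElem?_getD, List.getD_eq_getElem?_getD]
  simp [List.getElem?_eq_getElem hi, List.getElem?_eq_getElem hj]

theorem hPairB_eq (opens : List (List Int)) (x y : Int) :
    hPairB (disjM opens) (sigB opens x) (sigB opens y) = hausLoopA opens x y opens := by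
  rw [hausLoopA_eq_any, Bool.eq_iff_iff]
  simp only [hPairB, sigB_eq_sigFrom, List.any_eq_true, Bool.and_eq_true, List.contains_eq_mem,
    decide_eq_true_eq]
  constructor
  · rintro ⟨u, hu, v, hv, hd⟩
    obtain ⟨i, hi, hui, hxi⟩ := (mem_sigFrom_iff 0 opens x u).mp hu
    obtain ⟨j, hj, hvj, hyj⟩ := (mem_sigFrom_iff 0 opens y v).mp hv
    rw [zero_add] at hui hvj
    subst hui; subst hvj
    rw [disjM_get opens i j hi hj] at hd
    exact ⟨opens[i], List.getElem_mem hi, hxi, opens[j], List.getElem_mem hj, hyj, hd⟩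
  · rintro ⟨U, hU, hxU, V, hV, hyV, hd⟩
    obtain ⟨i, hi, rfl⟩ := List.mem_iff_getElem.mp hU
    obtain ⟨j, hj, rfl⟩ := List.mem_iff_getElem.mp hV
    refine ⟨(i : Int), ?_, (j : Int), ?_, ?_⟩
    · rw [mem_sigFrom_iff]; exact ⟨i, hi, by simp, hxU⟩
    · rw [mem_sigFrom_iff]; exact ⟨j, hj, by simp, hyV⟩
    · rw [disjM_get opens i j hi hj]; exact hd

theorem pairA_t0 (opens : List (List Int)) (x y : Int) :
    pairA opens "t0" x y = !(sigB opens x == sigB opens y) := by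
  rw [pairA, if_pos (by decide), Bool.eq_iff_iff]
  constructor
  · intro h
    simp only [List.any_eq_true] at h
    obtain ⟨U, hU, hne⟩ := h
    simp only [Bool.not_eq_true', beq_eq_false_iff_ne, ne_eq, sigB_eq_sigFrom, sigFrom_eq_iff]
    intro hall
    simp only [bne_iff_ne, ne_eq, List.contains_eq_mem, decide_eq_decide] at hne
    exact hne (hall U hU)
  · intro h
    simp only [Bool.not_eq_true', beq_eq_false_iff_ne, ne_eq, sigB_eq_sigFrom, sigFrom_eq_iff] at h
    simp only [List.any_eq_true]
    by_contra hc
    push_neg at hc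
    apply h
    intro U hU
    have hb := hc U hU
    simp only [bne_iff_ne, ne_eq, List.contains_eq_mem, decide_eq_decide, not_not] at hb
    exact hb

theorem pairA_t1 (opens : List (List Int)) (x y : Int) :
    pairA opens "t1" x y
      = !(subB (sigB opens x) (sigB opens y) || subB (sigB opens y) (sigB opens x)) := by
  rw [pairA, if_neg (by decide), if_pos (by decide), Bool.eq_iff_iff]
  constructor
  · intro h
    simp only [Bool.and_eq_true, List.any_eq_true, List.contains_eq_mem, Bool.not_eq_true',
      decide_eq_true_eq, decide_eq_false_iff_not] at h
    obtain ⟨⟨U, hU, hxU, hyU⟩, ⟨V, hV, hyV, hxV⟩⟩ := h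
    simp only [Bool.not_eq_true', Bool.or_eq_false_iff]
    constructor
    · rw [Bool.eq_false_iff]
      intro hs
      rw [sigB_eq_sigFrom, sigB_eq_sigFrom, subB_sigFrom_iff] at hs
      exact hyU (hs U hU hxU)
    · rw [Bool.eq_false_iff]
      intro hs
      rw [sigB_eq_sigFrom, sigB_eq_sigFrom, subB_sigFrom_iff] at hs
      exact hxV (hs V hV hyV)
  · intro h
    simp only [Bool.not_eq_true', Bool.or_eq_false_iff] at h
    obtain ⟨h1, h2⟩ := h
    rw [Bool.eq_false_iff] at h1 h2
    rw [sigB_eq_sigFrom, sigB_eq_sigFrom, Ne, subB_sigFrom_iff] at h1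
    rw [sigB_eq_sigFrom, sigB_eq_sigFrom, Ne, subB_sigFrom_iff] at h2
    push_neg at h1 h2
    obtain ⟨U, hU, hxU, hyU⟩ := h1
    obtain ⟨V, hV, hyV, hxV⟩ := h2
    simp only [Bool.and_eq_true, List.any_eq_true, List.contains_eq_mem, Bool.not_eq_true',
      decide_eq_true_eq, decide_eq_false_iff_not]
    exact ⟨⟨U, hU, hxU, hyU⟩, ⟨V, hV, hyV, hxV⟩⟩

theorem t0Loop_eq (l : List (List Int)) (seen : PySem.Set (List Int)) :
    t0Loop l seen = (decide l.Nodup && l.all (fun s => !(PySem.Set.contains seen s))) := by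
  induction l generalizing seen with
  | nil => simp [t0Loop]
  | cons s rest ih =>
    rw [t0Loop]
    by_cases hc : PySem.Set.contains seen s
    · rw [if_pos hc]
      have hall : (s :: rest).all (fun t => !(PySem.Set.contains seen t)) = false := by
        simp only [List.all_cons, hc, Bool.not_true, Bool.false_and]
      rw [hall, Bool.and_false]
    · rw [if_neg hc, ih, Bool.eq_iff_iff]
      have hcm : s ∉ seen := by simpa using hc
      have hadd : PySem.Set.add seen s = seen ++ [s] := by
        have hc' : seen.contains s = false := by simpa using hc
        simp [PySem.Set.add, hcm]
      simp only [hadd, List.all_eq_true, List.nodup_cons, Bool.and_eq_true, decide_eq_true_eq,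
        List.all_cons, PySem.Set.contains_eq_listContains, List.contains_eq_mem,
        Bool.not_eq_true', decide_eq_false_iff_not, List.mem_append, List.mem_singleton, not_or]
      constructor
      · rintro ⟨hn, hall⟩
        have h1 : s ∉ rest := fun hm => (hall s hm).2 rfl
        exact ⟨⟨h1, hn⟩, hcm, fun t ht => (hall t ht).1⟩
      · rintro ⟨⟨h1, hn⟩, -, hall⟩
        exact ⟨hn, fun t ht => ⟨hall t ht, fun he => h1 (he ▸ ht)⟩⟩

theorem goA_t0 (opens : List (List Int)) (points : List Int) :
    goA opens "t0" points = decide (points.map (sigB opens)).Nodup := by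
  induction points with
  | nil => simp [goA]
  | cons x rest ih =>
    rw [goA, ih]
    by_cases hc : rest.all (fun y => pairA opens "t0" x y)
    · rw [if_pos hc]
      have hnm : sigB opens x ∉ rest.map (sigB opens) := by
        simp only [List.all_eq_true, pairA_t0, Bool.not_eq_true', beq_eq_false_iff_ne, ne_eq] at hc
        simp only [List.mem_map, not_exists, not_and]
        rintro y hy he
        exact hc y hy he.symm
      simp [List.nodup_cons, hnm]
    · rw [if_neg hc]
      simp only [List.all_eq_true, pairA_t0, Bool.not_eq_true', beq_eq_false_iff_ne, ne_eq] at hc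
      push_neg at hc
      obtain ⟨y, hy, he⟩ := hc
      have hm : sigB opens x ∈ rest.map (sigB opens) := List.mem_map.mpr ⟨y, hy, he.symm⟩
      simp [List.nodup_cons, hm]

theorem goA_t1 (opens : List (List Int)) (points : List Int) :
    goA opens "t1" points = t1Go (points.map (sigB opens)) := by
  induction points with
  | nil => rfl
  | cons x rest ih =>
    rw [goA, List.map_cons, t1Go, ih, List.all_map]
    have hcond : (fun y => pairA opens "t1" x y)
        = (fun t => !(subB (sigB opens x) t || subB t (sigB opens x))) ∘ (sigB opens) := by
      funext y
      exact pairA_t1 opens x y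
    rw [hcond]

theorem goA_haus (opens : List (List Int)) (points : List Int) :
    goA opens "hausdorff" points = hGo (disjM opens) (points.map (sigB opens)) := by
  induction points with
  | nil => rfl
  | cons x rest ih =>
    rw [goA, List.map_cons, hGo, ih, List.all_map]
    have hcond : (fun y => pairA opens "hausdorff" x y)
        = (fun t => hPairB (disjM opens) (sigB opens x) t) ∘ (sigB opens) := by
      funext y
      rw [pairA, if_neg (by decide), if_neg (by decide), if_pos (by decide)]
      exact (hPairB_eq opens x y).symm
    rw [hcond]

theorem goA_other (opens : List (List Int)) (pn : String) (points : List Int)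
    (h0 : (pn == "t0") = false) (h1 : (pn == "t1") = false) (h2 : (pn == "hausdorff") = false) :
    goA opens pn points = true := by
  induction points with
  | nil => rfl
  | cons x rest ih =>
    rw [goA, ih, if_pos]
    simp [pairA, h0, h1, h2]

-- ===== VERDICT (by name: the statement is the Claim_ definition above) =====
theorem finite_basic_separation_py_spec : Claim_equal_finite_basic_separation_py := by
  intro opens points pn _
  unfold Spec_finite_basic_separation_py finite_basic_separation_py finite_basic_separation_py_alt
  by_cases h0 : pn == "t0"
  · have hpn : pn = "t0" := by simpa using h0
    subst hpn
    show goA opens "t0" points = t0Loop (points.map (sigB opens)) PySem.Set.empty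
    rw [goA_t0, t0Loop_eq]
    simp [PySem.Set.empty]
  · by_cases h1 : pn == "t1"
    · have hpn : pn = "t1" := by simpa using h1
      subst hpn
      show goA opens "t1" points = t1Go (points.map (sigB opens))
      exact goA_t1 opens points
    · by_cases h2 : pn == "hausdorff"
      · have hpn : pn = "hausdorff" := by simpa using h2
        subst hpn
        show goA opens "hausdorff" points = hGo (disjM opens) (points.map (sigB opens))
        exact goA_haus opens points
      · simp only [Bool.not_eq_true] at h0 h1 h2
        rw [goA_other opens pn points h0 h1 h2]
        simp [h0, h1, h2]
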